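-- pv_equiv track=rewrite | github.com/obadaKraishan/Launch-Day-Diffusion | src/01_collect_hn_posts.py | matches_keywords
-- ===== SOURCE A (Python) =====
-- def matches_keywords(title, url, keywords):
--     if not keywords:
--         return True
--     pats = [kw.strip() for kw in keywords.split(",") if kw.strip()]
--     if not pats:
--         return True
--     hay = f"{title or ''} {url or ''}".lower()
--     return any(kw.lower() in hay for kw in pats)
-- ===== SOURCE B (Python) =====
-- def matches_keywords(title, url, keywords):
--     # parse once, lowering each keyword up front; an empty/blank keywords
--     # string yields no patterns and means "match everything"
--     pats = [kw.strip().lower() for kw in (keywords or "").split(",") if kw.strip()]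
--     if not pats:
--         return True
--     hay = " ".join([title or "", url or ""]).lower()
--     # single left-to-right scan over the haystack positions, trying each
--     # pattern at the current position, instead of k independent `in` searches
--     for i in range(len(hay) + 1):
--         for p in pats:
--             if hay.startswith(p, i):
--                 return True
--     return False
-- ===== Notes on version B (the rewrite author's own statement) =====
-- stated objective: alternative
-- what changed: Replaces the keyword-major any(kw in hay) with a single position-major left-to-right scan of the haystack that tries each pre-lowered pattern at every position (the patterns are lowered once while parsing instead of inside the match loop).
import Mathlib
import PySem

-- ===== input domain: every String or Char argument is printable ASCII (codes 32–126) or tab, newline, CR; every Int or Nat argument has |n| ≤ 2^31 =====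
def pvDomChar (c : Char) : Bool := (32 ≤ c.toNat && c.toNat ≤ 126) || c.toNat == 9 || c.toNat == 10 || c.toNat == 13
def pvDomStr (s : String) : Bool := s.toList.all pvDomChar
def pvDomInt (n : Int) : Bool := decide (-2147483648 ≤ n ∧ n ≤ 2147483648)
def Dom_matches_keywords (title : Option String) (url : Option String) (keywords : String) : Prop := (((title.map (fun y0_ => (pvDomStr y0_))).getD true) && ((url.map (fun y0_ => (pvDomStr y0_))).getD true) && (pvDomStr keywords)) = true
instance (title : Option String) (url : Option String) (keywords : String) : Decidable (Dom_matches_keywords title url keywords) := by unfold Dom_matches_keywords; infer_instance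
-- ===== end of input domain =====

-- B replaces the keyword-major any(kw in hay) of A with a single position-major
-- left-to-right scan of the haystack trying each pre-lowered pattern at each position
-- (alternative decomposition, same exact result).


-- ===== PORT A =====
-- literal port of A: guard on empty keywords; comprehension = filter (truthy strip)
-- then map strip; hay = "<title or ''> <url or ''>".lower(); any(kw.lower() in hay)
def matches_keywords (title : Option String) (url : Option String) (keywords : String) : Bool :=
  if keywords.toList = [] then true
  else
    let pats := ((PySem.Chars.splitOn keywords.toList [',']).filter
        (fun kw => !(PySem.Chars.strip kw).isEmpty)).map PySem.Chars.strip
    if pats = [] then true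
    else
      let hay := PySem.Chars.lower ((title.getD "").toList ++ [' '] ++ (url.getD "").toList)
      pats.any (fun kw => PySem.Chars.isIn (PySem.Chars.lower kw) hay)

-- ===== PORT B =====
-- the position-major scan of Source B: for i in range(len(hay)+1): for p in pats:
-- hay.startswith(p, i); recursion over the suffixes of hay = the positions i
def pvScan (pats : List (List Char)) : List Char → Bool
  | [] => pats.any (fun p => p.isPrefixOf [])
  | c :: rest => pats.any (fun p => p.isPrefixOf (c :: rest)) || pvScan pats rest

def matches_keywords_alt (title : Option String) (url : Option String) (keywords : String) : Bool :=
  let pats := ((PySem.Chars.splitOn keywords.toList [',']).filter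
      (fun kw => !(PySem.Chars.strip kw).isEmpty)).map
      (fun kw => PySem.Chars.lower (PySem.Chars.strip kw))
  if pats = [] then true
  else
    let hay := PySem.Chars.lower (PySem.Chars.join [' ']
        [(title.getD "").toList, (url.getD "").toList])
    pvScan pats hay

-- ===== PRECONDITION & SPEC =====
def Spec_matches_keywords (title : Option String) (url : Option String) (keywords : String) (out : Bool) : Prop := out = matches_keywords_alt title url keywords
instance (title : Option String) (url : Option String) (keywords : String) (out : Bool) : Decidable (Spec_matches_keywords title url keywords out) := by unfold Spec_matches_keywords; infer_instance

-- ===== CLAIM (what is proved, stated in full; the proofs are below) =====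
def Claim_equal_matches_keywords : Prop := ∀ (title : Option String) (url : Option String) (keywords : String), Dom_matches_keywords title url keywords → Spec_matches_keywords title url keywords (matches_keywords title url keywords)

-- ===== LEMMAS AND PROOFS =====

-- the position-major scan finds a pattern iff some pattern is a substring
theorem pvScan_eq_any_isIn (pats : List (List Char)) (cs : List Char) :
    pvScan pats cs = pats.any (fun p => PySem.Chars.isIn p cs) := by
  induction cs with
  | nil =>
    simp only [pvScan]
    rw [Bool.eq_iff_iff]
    simp [List.any_eq_true, List.isPrefixOf_iff_prefix, PySem.Chars.isIn_iff_infix]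
  | cons c rest ih =>
    simp only [pvScan, ih]
    rw [Bool.eq_iff_iff]
    simp only [Bool.or_eq_true, List.any_eq_true, List.isPrefixOf_iff_prefix,
      PySem.Chars.isIn_iff_infix, List.infix_cons_iff]
    constructor
    · rintro (⟨p, hp, h⟩ | ⟨p, hp, h⟩)
      · exact ⟨p, hp, Or.inl h⟩
      · exact ⟨p, hp, Or.inr h⟩
    · rintro ⟨p, hp, h | h⟩
      · exact Or.inl ⟨p, hp, h⟩
      · exact Or.inr ⟨p, hp, h⟩

-- lowering a list of patterns commutes with the any/isIn test done lowered
theorem any_map_lower (l : List (List Char)) (hay : List Char) :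
    (l.map (fun kw => PySem.Chars.lower (PySem.Chars.strip kw))).any
        (fun p => PySem.Chars.isIn p hay)
      = (l.map PySem.Chars.strip).any
        (fun kw => PySem.Chars.isIn (PySem.Chars.lower kw) hay) := by
  simp [List.any_map, Function.comp_def]

-- ===== VERDICT (by name: the statement is the Claim_ definition above) =====
theorem matches_keywords_spec : Claim_equal_matches_keywords := by
  intro title url keywords _
  unfold Spec_matches_keywords matches_keywords matches_keywords_alt
  by_cases hk : keywords.toList = []
  · have hsplit : ((PySem.Chars.splitOn ([] : List Char) [',']).filter
        (fun kw => !(PySem.Chars.strip kw).isEmpty)) = [] := by decide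
    simp [hk, hsplit]
  · simp only [hk, if_false, PySem.Chars.join_cons_cons, PySem.Chars.join_singleton]
    set base := (PySem.Chars.splitOn keywords.toList [',']).filter
        (fun kw => !(PySem.Chars.strip kw).isEmpty) with hbase
    have hemp : (base.map PySem.Chars.strip = []) ↔
        (base.map (fun kw => PySem.Chars.lower (PySem.Chars.strip kw)) = []) := by
      simp
    by_cases h0 : base.map PySem.Chars.strip = []
    · simp [h0, hemp.mp h0]
    · rw [if_neg h0, if_neg (fun h => h0 (hemp.mpr h))]
      rw [pvScan_eq_any_isIn, any_map_lower]
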